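-- pv_equiv track=rewrite | github.com/Pineci/ranked-pairs-voting | src/voting.py | InCycle
-- ===== SOURCE A (Python) =====
-- from typing import List, Dict, Union
--
-- def InCycle(graph: Dict[str, List[str]], vertex: str) -> bool:
--     def CreatesCycle(graph, currentkey, depth):
--         if depth > len(graph.keys())+1:
--             return False
--         if currentkey in graph.keys():
--             for key in graph[currentkey]:
--                 if key == vertex:
--                     return True
--                 if CreatesCycle(graph, key, depth+1):
--                     return True
--         return False
--     return CreatesCycle(graph, vertex, 0)
-- ===== SOURCE B (Python) =====
-- def InCycle(graph, vertex):
--     # Saturate the set of nodes reachable from vertex (len(graph)+1 rounds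
--     # suffice to reach the same horizon as A's depth bound), then test
--     # whether vertex itself was reached.
--     reach = set(graph.get(vertex, []))
--     for _ in range(len(graph) + 1):
--         for u in list(reach):
--             for w in graph.get(u, []):
--                 reach.add(w)
--     return vertex in reach
-- ===== Notes on version B (the rewrite author's own statement) =====
-- stated objective: alternative
-- what changed: replaces A's depth-bounded recursive backtracking DFS (closure over vertex, re-exploring paths up to length n+2) with a non-recursive saturation of the reachable-from-vertex set over n+1 rounds followed by a single membership test
import Mathlib
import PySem

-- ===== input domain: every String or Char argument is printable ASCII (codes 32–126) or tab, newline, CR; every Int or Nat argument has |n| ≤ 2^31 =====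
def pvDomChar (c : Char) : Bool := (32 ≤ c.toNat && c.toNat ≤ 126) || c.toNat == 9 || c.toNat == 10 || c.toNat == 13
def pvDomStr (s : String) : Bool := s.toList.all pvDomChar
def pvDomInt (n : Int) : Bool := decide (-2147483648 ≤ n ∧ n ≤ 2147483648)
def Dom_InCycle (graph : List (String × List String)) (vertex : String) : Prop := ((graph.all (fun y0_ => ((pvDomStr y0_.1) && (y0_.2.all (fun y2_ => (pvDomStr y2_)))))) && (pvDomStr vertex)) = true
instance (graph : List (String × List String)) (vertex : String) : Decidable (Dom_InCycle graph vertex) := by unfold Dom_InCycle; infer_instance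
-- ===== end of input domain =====

-- B replaces A's depth-bounded recursive backtracking search with an iterative
-- saturation of the set of nodes reachable from `vertex`, then one membership test.

-- ===== PORT A =====
-- inner helper CreatesCycle(graph, currentkey, depth); `vertex` is the captured closure variable.
-- len(graph.keys()) is the number of dict entries, i.e. graph.length; depth (always ≥ 0) is a Nat.
def pvCreatesA (g : List (String × List String)) (vertex : String) (cur : String) (depth : Nat) : Bool :=
  if _h : g.length + 1 < depth then false
  else
    -- 'if currentkey in graph.keys(): for key in graph[currentkey]: …' — membership and the
    -- first-match lookup are both the one get?; the early-return for-loop is List.any.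
    match PySem.Dict.get? (PySem.Dict.mk g) cur with
    | some lst => lst.any (fun k => k == vertex || pvCreatesA g vertex k (depth + 1))
    | none => false
termination_by g.length + 2 - depth
decreasing_by omega

def InCycle (graph : List (String × List String)) (vertex : String) : Bool :=
  pvCreatesA graph vertex vertex 0

-- ===== PORT B =====
-- graph.get(u, [])
def pvSucc (g : List (String × List String)) (u : String) : List String :=
  PySem.Dict.getD (PySem.Dict.mk g) u []

-- one round: 'for u in list(reach): for w in graph.get(u, []): reach.add(w)'
def pvRound (g : List (String × List String)) (r : PySem.Set String) : PySem.Set String :=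
  r.foldl (fun acc u => (pvSucc g u).foldl (fun a w => PySem.Set.add a w) acc) r

def InCycle_alt (graph : List (String × List String)) (vertex : String) : Bool :=
  let reach0 : PySem.Set String := PySem.Set.ofList (pvSucc graph vertex)
  let reach := (PySem.List.pyRange 0 (graph.length + 1) 1).foldl (fun r _ => pvRound graph r) reach0
  PySem.Set.contains reach vertex

-- ===== PRECONDITION & SPEC =====
def Spec_InCycle (graph : List (String × List String)) (vertex : String) (out : Bool) : Prop := out = InCycle_alt graph vertex
instance (graph : List (String × List String)) (vertex : String) (out : Bool) : Decidable (Spec_InCycle graph vertex out) := by unfold Spec_InCycle; infer_instance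

-- ===== CLAIM (what is proved, stated in full; the proofs are below) =====
def Claim_equal_InCycle : Prop := ∀ (graph : List (String × List String)) (vertex : String), Dom_InCycle graph vertex → Spec_InCycle graph vertex (InCycle graph vertex)

-- ===== LEMMAS AND PROOFS =====

-- path of length j from u ending in tgt, every step an edge of the (first-match) graph
def pvWalk (g : List (String × List String)) (tgt : String) : Nat → String → Prop
  | 0, u => u = tgt
  | j+1, u => ∃ k ∈ pvSucc g u, pvWalk g tgt j k

-- fuel-indexed form of A's bounded search
def pvReachIn (g : List (String × List String)) (vtx : String) : Nat → String → Bool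
  | 0, _ => false
  | f+1, cur => (pvSucc g cur).any (fun k => k == vtx || pvReachIn g vtx f k)

theorem pvCreatesA_eq_reachIn (g : List (String × List String)) (vtx : String) :
    ∀ f depth cur, g.length + 2 - depth = f → pvCreatesA g vtx cur depth = pvReachIn g vtx f cur := by
  intro f
  induction f with
  | zero =>
    intro depth cur h
    rw [pvCreatesA, dif_pos (by omega : g.length + 1 < depth)]
    simp [pvReachIn]
  | succ f ih =>
    intro depth cur h
    rw [pvCreatesA, dif_neg (by omega : ¬ g.length + 1 < depth)]
    simp only [pvReachIn]
    have hf : (fun k => k == vtx || pvCreatesA g vtx k (depth + 1)) =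
        (fun k => k == vtx || pvReachIn g vtx f k) :=
      funext fun k => by rw [ih (depth + 1) k (by omega)]
    cases hget : PySem.Dict.get? (PySem.Dict.mk g) cur with
    | none =>
      have hs : pvSucc g cur = [] := by
        simp [pvSucc, PySem.Dict.getD_eq_get?_getD, hget]
      rw [hs]; rfl
    | some lst =>
      have hs : pvSucc g cur = lst := by
        simp [pvSucc, PySem.Dict.getD_eq_get?_getD, hget]
      rw [hs, hf]

theorem pvReachIn_iff (g : List (String × List String)) (vtx : String) :
    ∀ f cur, pvReachIn g vtx f cur = true ↔ ∃ j, 1 ≤ j ∧ j ≤ f ∧ pvWalk g vtx j cur := by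
  intro f
  induction f with
  | zero =>
    intro cur
    simp only [pvReachIn]
    constructor
    · intro h; exact absurd h (by simp)
    · rintro ⟨j, h1, h2, _⟩; omega
  | succ f ih =>
    intro cur
    simp only [pvReachIn, List.any_eq_true, Bool.or_eq_true, beq_iff_eq, ih]
    constructor
    · rintro ⟨k, hk, hkv | ⟨j, hj1, hj2, hw⟩⟩
      · exact ⟨1, le_refl 1, by omega, ⟨k, hk, hkv⟩⟩
      · exact ⟨j + 1, by omega, by omega, ⟨k, hk, hw⟩⟩
    · rintro ⟨j, hj1, hj2, hw⟩
      obtain ⟨j', rfl⟩ : ∃ j', j = j' + 1 := ⟨j - 1, by omega⟩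
      obtain ⟨k, hk, hw'⟩ := hw
      refine ⟨k, hk, ?_⟩
      cases j' with
      | zero => exact Or.inl hw'
      | succ m => exact Or.inr ⟨m + 1, by omega, by omega, hw'⟩

theorem pvWalk_snoc (g : List (String × List String)) (x : String) :
    ∀ j v, pvWalk g x (j+1) v ↔ ∃ u, pvWalk g u j v ∧ x ∈ pvSucc g u := by
  intro j
  induction j with
  | zero =>
    intro v
    simp only [pvWalk]
    constructor
    · rintro ⟨k, hk, rfl⟩; exact ⟨v, rfl, hk⟩
    · rintro ⟨u, rfl, hx⟩; exact ⟨x, hx, rfl⟩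
  | succ j ih =>
    intro v
    simp only [pvWalk]
    constructor
    · rintro ⟨k, hk, hw⟩
      obtain ⟨u, hu, hx⟩ := (ih k).mp hw
      exact ⟨u, ⟨k, hk, hu⟩, hx⟩
    · rintro ⟨u, ⟨k, hk, hu⟩, hx⟩
      exact ⟨k, hk, (ih k).mpr ⟨u, hu, hx⟩⟩

theorem mem_pvRound (g : List (String × List String)) (r : PySem.Set String) (x : String) :
    x ∈ pvRound g r ↔ x ∈ r ∨ ∃ u ∈ r, x ∈ pvSucc g u := by
  have aux : ∀ (l : List String) (acc : PySem.Set String),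
      x ∈ l.foldl (fun acc u => (pvSucc g u).foldl (fun a w => PySem.Set.add a w) acc) acc ↔
        x ∈ acc ∨ ∃ u ∈ l, x ∈ pvSucc g u := by
    intro l
    induction l with
    | nil => intro acc; simp
    | cons u us ih =>
      intro acc
      rw [List.foldl_cons, ih]
      have h1 : x ∈ (pvSucc g u).foldl (fun a w => PySem.Set.add a w) acc ↔
          x ∈ acc ∨ ∃ b ∈ pvSucc g u, x = b :=
        PySem.Set.mem_foldl_add (f := fun w => w) (l := pvSucc g u) (s := acc) x
      simp only [h1]
      constructor
      · rintro (((h | ⟨b, hb, rfl⟩) ) | ⟨w, hw, hws⟩)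
        · exact Or.inl h
        · exact Or.inr ⟨u, List.mem_cons_self .., hb⟩
        · exact Or.inr ⟨w, List.mem_cons_of_mem _ hw, hws⟩
      · rintro (h | ⟨w, hw, hws⟩)
        · exact Or.inl (Or.inl h)
        · rcases List.mem_cons.mp hw with rfl | hw'
          · exact Or.inl (Or.inr ⟨x, hws, rfl⟩)
          · exact Or.inr ⟨w, hw', hws⟩
  exact aux r r

theorem foldl_const_iterate {α β : Type} (f : α → α) :
    ∀ (l : List β) (a : α), l.foldl (fun r _ => f r) a = f^[l.length] a := by
  intro l
  induction l with
  | nil => intro a; rfl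
  | cons x xs ih => intro a; simp [List.foldl, ih, Function.iterate_succ_apply]

theorem mem_iterate_round (g : List (String × List String)) (v : String) :
    ∀ (k : Nat) (x : String),
      x ∈ (fun r => pvRound g r)^[k] (PySem.Set.ofList (pvSucc g v)) ↔
        ∃ j, 1 ≤ j ∧ j ≤ k + 1 ∧ pvWalk g x j v := by
  intro k
  induction k with
  | zero =>
    intro x
    simp only [Function.iterate_zero, id_eq]
    rw [PySem.Set.mem_ofList]
    constructor
    · intro h; exact ⟨1, le_refl 1, le_refl 1, ⟨x, h, rfl⟩⟩
    · rintro ⟨j, h1, h2, hw⟩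
      have : j = 1 := by omega
      subst this
      obtain ⟨m, hm, rfl⟩ := hw
      exact hm
  | succ k ih =>
    intro x
    rw [Function.iterate_succ_apply', mem_pvRound]
    constructor
    · rintro (h | ⟨u, hu, hx⟩)
      · obtain ⟨j, h1, h2, hw⟩ := (ih x).mp h
        exact ⟨j, h1, by omega, hw⟩
      · obtain ⟨j, h1, h2, hw⟩ := (ih u).mp hu
        exact ⟨j + 1, by omega, by omega, (pvWalk_snoc g x j v).mpr ⟨u, hw, hx⟩⟩
    · rintro ⟨j, h1, h2, hw⟩
      by_cases hj : j ≤ k + 1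
      · exact Or.inl ((ih x).mpr ⟨j, h1, hj, hw⟩)
      · have hjk : j = (k + 1) + 1 := by omega
        subst hjk
        obtain ⟨u, hu, hx⟩ := (pvWalk_snoc g x (k + 1) v).mp hw
        exact Or.inr ⟨u, (ih u).mpr ⟨k + 1, by omega, le_refl _, hu⟩, hx⟩

-- ===== VERDICT (by name: the statement is the Claim_ definition above) =====
theorem InCycle_spec : Claim_equal_InCycle := by
  unfold Claim_equal_InCycle
  intro g v _
  unfold Spec_InCycle
  have hlen : (PySem.List.pyRange 0 ((g.length : Int) + 1) 1).length = g.length + 1 := by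
    rw [PySem.List.length_pyRange_one]; omega
  have hiff : InCycle g v = true ↔ InCycle_alt g v = true := by
    rw [show InCycle g v = pvReachIn g v (g.length + 2) v from
      pvCreatesA_eq_reachIn g v (g.length + 2) 0 v (by omega)]
    rw [pvReachIn_iff]
    show _ ↔ PySem.Set.contains
      ((PySem.List.pyRange 0 ((g.length : Int) + 1) 1).foldl (fun r _ => pvRound g r)
        (PySem.Set.ofList (pvSucc g v))) v = true
    rw [foldl_const_iterate, hlen, PySem.Set.contains_iff, mem_iterate_round]
  cases hA : InCycle g v <;> cases hB : InCycle_alt g v <;> simp_all
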